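-- pv_equiv track=rewrite | github.com/geemaple/leetcode | lintcode/437.copy-books.py | copy_books
-- ===== SOURCE A (Python) =====
-- from typing import (
--     List,
-- )
--
-- def copy_books(pages: List[int], k: int) -> int:
--     # write your code here
--     n = len(pages)
--     dp = [[float('inf')] * (n + 1) for i in range(k + 1)]
--
--     for i in range(k + 1):
--         dp[i][0] = 0
--
--     for i in range(1, k + 1):
--         for j in range(1, n + 1):
--             work_load = 0
--             for p in range(j - 1, -1, -1):
--                 work_load += pages[p]
--                 cost = max(dp[i - 1][p], work_load)
--                 dp[i][j] = min(dp[i][j], cost)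
--
--     return dp[k][n]
-- ===== SOURCE B (Python) =====
-- def copy_books(pages, k):
--     # top-down memoized recursion over (books copied, copiers used), with prefix sums
--     n = len(pages)
--     prefix = [0]
--     total = 0
--     for p in pages:
--         total += p
--         prefix.append(total)
--     memo = {}
--
--     def best(j, i):
--         # minimal max workload to copy the first j books with i copiers (None = impossible)
--         if j == 0:
--             return 0
--         if i == 0:
--             return None
--         if (j, i) in memo:
--             return memo[(j, i)]
--         res = None
--         for p in range(j):
--             prev = best(p, i - 1)
--             if prev is None:
--                 continue
--             cand = max(prev, prefix[j] - prefix[p])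
--             if res is None or cand < res:
--                 res = cand
--         memo[(j, i)] = res
--         return res
--
--     return best(n, k)
-- ===== Notes on version B (the rewrite author's own statement) =====
-- stated objective: alternative
-- what changed: B replaces A's bottom-up k x n x n table (with float('inf') sentinels and a backward running workload) by top-down memoized recursion over (books, copiers) with a precomputed prefix-sum array and None for infeasible states.
-- outside the precondition, e.g. on copy_books([1], 0): A returns inf, B returns None
import Mathlib
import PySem

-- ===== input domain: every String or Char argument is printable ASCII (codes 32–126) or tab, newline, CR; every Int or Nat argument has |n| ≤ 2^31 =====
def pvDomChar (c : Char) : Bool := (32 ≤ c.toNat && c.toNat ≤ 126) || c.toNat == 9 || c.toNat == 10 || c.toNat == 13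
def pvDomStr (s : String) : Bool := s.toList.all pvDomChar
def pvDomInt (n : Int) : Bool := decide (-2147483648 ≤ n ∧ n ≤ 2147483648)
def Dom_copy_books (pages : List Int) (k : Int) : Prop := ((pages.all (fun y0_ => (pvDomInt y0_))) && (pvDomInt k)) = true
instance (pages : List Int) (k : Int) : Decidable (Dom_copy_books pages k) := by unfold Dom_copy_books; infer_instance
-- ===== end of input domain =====

-- B replaces A's bottom-up k x n x n DP table by top-down memoized recursion with prefix sums (same asymptotic cost).


-- ===== PORT A =====
-- float('inf') entries are modelled by `none`: max(inf, w) = inf, min with inf = the other side.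
def pvOptMax (a : Option Int) (w : Int) : Option Int := a.map (fun x => max x w)
def pvOptMin (a b : Option Int) : Option Int :=
  match a, b with
  | none, b => b
  | a, none => a
  | some x, some y => some (min x y)

-- the inner `for p in range(j-1, -1, -1)` loop of A: state = (work_load, dp[i][j] so far);
-- the list indexings pages[p], dp[i-1][p] are in range for every visited p, so pyGetD is exact here.
def pvInner (prev : List (Option Int)) (pages : List Int) (j : Int) : Option Int :=
  ((PySem.List.pyRange (j - 1) (-1) (-1)).foldl
    (fun (st : Int × Option Int) p =>
      let w := st.1 + PySem.List.pyGetD pages p 0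
      let cost := pvOptMax (PySem.List.pyGetD prev p none) w
      (w, pvOptMin st.2 cost))
    ((0 : Int), (none : Option Int))).2

-- dp[i][j] is written only during outer iteration i and reads only row i-1, so the table is kept
-- row by row: row 0 is dp[0] after the init loops, each outer iteration builds dp[i] from dp[i-1]
-- exactly as A's j/p loops do.  The final dp[k][n]: `none` would be float('inf') (k = 0, n > 0) and
-- a missing row would be the IndexError for k < 0 — both excluded by Pre_, so .getD 0 is never used
-- on admitted inputs.
-- the `for j in range(1, n+1)` loop building dp[i] from dp[i-1] (dp[i][0] stays 0 from the init loop)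
def pvNewRow (pages : List Int) (n : Int) (prev : List (Option Int)) : List (Option Int) :=
  (PySem.List.pyRange 0 (n + 1) 1).map
    (fun j => if j = 0 then some (0 : Int) else pvInner prev pages j)

def copy_books (pages : List Int) (k : Int) : Int :=
  let n : Int := (pages.length : Int)
  let row0 : List (Option Int) :=
    (PySem.List.pyRange 0 (n + 1) 1).map (fun j => if j = 0 then some (0 : Int) else none)
  let last :=
    (PySem.List.pyRange 1 (k + 1) 1).foldl (fun prev _i => pvNewRow pages n prev) row0
  (PySem.List.pyGetD last n none).getD 0

-- ===== PORT B =====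
-- the prefix-sum building loop of Source B: state = (prefix list, running total)
def pvPrefix (pages : List Int) : List Int :=
  (pages.foldl (fun (st : List Int × Int) p => (st.1 ++ [st.2 + p], st.2 + p)) (([0], 0))).1

-- Source B's recursive `best(j, i)`; the memo dict is a pure cache and does not change the value,
-- so the port is the bare recursion.  prefix[j], prefix[p] are in range (j ≤ n, p < j), so getD is exact.
def pvBest (pfx : List Int) (j : Nat) (i : Int) : Option Int :=
  if j = 0 then some 0
  else if i = 0 then none
  else
    (List.range j).attach.foldl
      (fun (res : Option Int) pp =>
        match pvBest pfx pp.1 (i - 1) with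
        | none => res
        | some prev =>
          let cand := max prev (pfx.getD j 0 - pfx.getD pp.1 0)
          match res with
          | none => some cand
          | some r => some (min cand r))
      none
termination_by j
decreasing_by exact List.mem_range.mp pp.2

-- `best(n, k)` is None only outside Pre_ (it is an int on every admitted input); .getD 0 mirrors that.
def copy_books_alt (pages : List Int) (k : Int) : Int :=
  (pvBest (pvPrefix pages) pages.length k).getD 0

-- ===== PRECONDITION & SPEC =====
-- Pre_ excludes k < 0 (A raises IndexError) and k = 0 with nonempty pages (A returns float('inf'),
-- not an int; B returns None there).
def Pre_copy_books (pages : List Int) (k : Int) : Prop := 1 ≤ k ∨ (k = 0 ∧ pages = [])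
instance (pages : List Int) (k : Int) : Decidable (Pre_copy_books pages k) := by
  unfold Pre_copy_books; infer_instance
def pvWitness_copy_books : List Int × Int := ([3, 2, 4], 2)

def Spec_copy_books (pages : List Int) (k : Int) (out : Int) : Prop := out = copy_books_alt pages k
instance (pages : List Int) (k : Int) (out : Int) : Decidable (Spec_copy_books pages k out) := by
  unfold Spec_copy_books; infer_instance

-- ===== CLAIM (what is proved, stated in full; the proofs are below) =====
def Claim_equal_copy_books : Prop := ∀ (pages : List Int) (k : Int), Dom_copy_books pages k → Pre_copy_books pages k → Spec_copy_books pages k (copy_books pages k)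

-- ===== LEMMAS AND PROOFS =====

-- ---- pvOptMin algebra ----
theorem pvOptMin_none (a : Option Int) : pvOptMin a none = a := by cases a <;> rfl
theorem pvOptMin_comm (a b : Option Int) : pvOptMin a b = pvOptMin b a := by
  cases a <;> cases b <;> simp [pvOptMin, min_comm]
theorem pvOptMin_assoc (a b c : Option Int) : pvOptMin (pvOptMin a b) c = pvOptMin a (pvOptMin b c) := by
  cases a <;> cases b <;> cases c <;> simp [pvOptMin, min_assoc]

theorem pvFoldl_hoist {α : Type} (c : α → Option Int) (l : List α) (r v : Option Int) :
    l.foldl (fun res x => pvOptMin res (c x)) (pvOptMin r v)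
      = pvOptMin (l.foldl (fun res x => pvOptMin res (c x)) r) v := by
  induction l generalizing r with
  | nil => rfl
  | cons x l ih =>
    simp only [List.foldl_cons]
    rw [pvOptMin_assoc, pvOptMin_comm v, ← pvOptMin_assoc, ih]

theorem pvFoldl_reverse {α : Type} (c : α → Option Int) (l : List α) (r : Option Int) :
    l.reverse.foldl (fun res x => pvOptMin res (c x)) r
      = l.foldl (fun res x => pvOptMin res (c x)) r := by
  induction l generalizing r with
  | nil => rfl
  | cons x l ih =>
    simp only [List.reverse_cons, List.foldl_append, List.foldl_cons, List.foldl_nil, ih]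
    rw [← pvFoldl_hoist]

-- ---- prefix sums ----
theorem pvPrefix_go (l : List Int) : ∀ (acc : List Int) (t : Int),
    (l.foldl (fun (st : List Int × Int) p => (st.1 ++ [st.2 + p], st.2 + p)) (acc, t)).1
      = acc ++ (List.range l.length).map (fun m => t + (l.take (m + 1)).sum) := by
  induction l with
  | nil => intro acc t; simp
  | cons p tl ih =>
    intro acc t
    simp only [List.foldl_cons, ih, List.length_cons, List.range_succ_eq_map]
    simp [List.map_map, Function.comp_def, add_assoc]

theorem pvPrefix_eq (pages : List Int) :
    pvPrefix pages = (List.range (pages.length + 1)).map (fun m => (pages.take m).sum) := by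
  unfold pvPrefix
  rw [pvPrefix_go]
  rw [List.range_succ_eq_map]
  simp [List.map_map, Function.comp_def]

theorem pvPrefix_getD (pages : List Int) (m : Nat) (hm : m ≤ pages.length) :
    (pvPrefix pages).getD m 0 = (pages.take m).sum := by
  rw [pvPrefix_eq]
  rw [List.getD_eq_getElem?_getD, List.getElem?_map, List.getElem?_range (by omega)]
  rfl

-- ---- the inner p-loop ----
def pvCand (pages : List Int) (prev : List (Option Int)) (j p : Nat) : Option Int :=
  pvOptMax (PySem.List.pyGetD prev (p : Int) none)
    (((pages.take j).sum : Int) - (pages.take p).sum)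

theorem pvInner_go (pages : List Int) (prev : List (Option Int)) (m : Nat)
    (hm : m ≤ pages.length) : ∀ (t : Nat), t ≤ m → ∀ (r : Option Int),
    ((PySem.List.pyRange ((t : Int) - 1) (-1) (-1)).foldl
      (fun (st : Int × Option Int) p =>
        let w := st.1 + PySem.List.pyGetD pages p 0
        let cost := pvOptMax (PySem.List.pyGetD prev p none) w
        (w, pvOptMin st.2 cost))
      (((pages.take m).sum - (pages.take t).sum : Int), r)).2
      = (List.range t).reverse.foldl (fun res p => pvOptMin res (pvCand pages prev m p)) r := by
  intro t
  induction t with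
  | zero =>
    intro _ r
    rw [PySem.List.pyRange_neg_one_eq_nil (by norm_num)]
    simp
  | succ t ih =>
    intro ht r
    have h1 : ((t + 1 : Nat) : Int) - 1 = (t : Int) := by push_cast; ring
    rw [h1, PySem.List.pyRange_neg_one_cons (by omega)]
    simp only [List.foldl_cons]
    have hget : PySem.List.pyGetD pages (t : Int) 0 = pages[t]'(by omega) := by
      rw [PySem.List.pyGetD_natCast]
      exact List.getD_eq_getElem _ _ (by omega)
    have hsum : (pages.take (t + 1)).sum = (pages.take t).sum + pages[t]'(by omega) :=
      List.sum_take_succ _ _ _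
    have hw : ((pages.take m).sum - (pages.take (t + 1)).sum : Int) + PySem.List.pyGetD pages (t : Int) 0
        = (pages.take m).sum - (pages.take t).sum := by
      rw [hget, hsum]; ring
    have hrange : (List.range (t + 1)).reverse
        = t :: (List.range t).reverse := by
      rw [List.range_succ, List.reverse_append]; rfl
    rw [hrange]
    simp only [List.foldl_cons]
    have := ih (by omega) (pvOptMin r (pvOptMax (PySem.List.pyGetD prev (t : Int) none)
      (((pages.take m).sum - (pages.take (t + 1)).sum : Int) + PySem.List.pyGetD pages (t : Int) 0)))
    simp only [hw] at this ⊢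
    rw [this]
    rfl

theorem pvInner_eq (pages : List Int) (prev : List (Option Int)) (m : Nat)
    (hm : m ≤ pages.length) :
    pvInner prev pages (m : Int)
      = (List.range m).foldl (fun res p => pvOptMin res (pvCand pages prev m p)) none := by
  unfold pvInner
  have h0 : ((pages.take m).sum - (pages.take m).sum : Int) = 0 := by ring
  have := pvInner_go pages prev m hm m le_rfl none
  rw [h0] at this
  rw [this, pvFoldl_reverse]

-- ---- rows of A's table vs pvBest ----
def pvRow (pages : List Int) (t : Nat) : List (Option Int) :=
  (List.range (pages.length + 1)).map (fun j => pvBest (pvPrefix pages) j (t : Int))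

theorem pvRow_getD (pages : List Int) (t p : Nat) (hp : p ≤ pages.length) :
    PySem.List.pyGetD (pvRow pages t) (p : Int) none = pvBest (pvPrefix pages) p (t : Int) := by
  rw [PySem.List.pyGetD_natCast]
  unfold pvRow
  rw [List.getD_eq_getElem?_getD, List.getElem?_map, List.getElem?_range (by omega)]
  rfl

theorem pvBest_succ (pages : List Int) (j : Nat) (hj : 1 ≤ j) (hjn : j ≤ pages.length) (t : Nat) :
    pvBest (pvPrefix pages) j ((t : Int) + 1)
      = (List.range j).foldl (fun res p => pvOptMin res (pvCand pages (pvRow pages t) j p)) none := by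
  rw [pvBest]
  have hj0 : ¬ (j = 0) := by omega
  have ht0 : ¬ ((t : Int) + 1 = 0) := by omega
  simp only [hj0, ht0, if_false]
  rw [List.foldl_attach (f := fun (res : Option Int) (p : Nat) =>
    match pvBest (pvPrefix pages) p ((t : Int) + 1 - 1) with
    | none => res
    | some prev =>
      match res with
      | none => some (max prev ((pvPrefix pages).getD j 0 - (pvPrefix pages).getD p 0))
      | some r => some (min (max prev ((pvPrefix pages).getD j 0 - (pvPrefix pages).getD p 0)) r))]
  apply PySem.List.foldl_congr_mem
  intro res p hp
  have hpj : p < j := List.mem_range.mp hp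
  rw [show (t : Int) + 1 - 1 = (t : Int) by ring]
  rw [pvCand, pvRow_getD pages t p (by omega)]
  rw [pvPrefix_getD pages j hjn, pvPrefix_getD pages p (by omega)]
  cases pvBest (pvPrefix pages) p (t : Int) with
  | none => simp [pvOptMax, pvOptMin_none]
  | some v =>
    cases res with
    | none => simp [pvOptMax, pvOptMin]
    | some r => simp [pvOptMax, pvOptMin, min_comm]

-- ---- row 0 and the row step ----
theorem pvRow_zero (pages : List Int) :
    (PySem.List.pyRange 0 ((pages.length : Int) + 1) 1).map
        (fun j => if j = 0 then some (0 : Int) else none)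
      = pvRow pages 0 := by
  have h : ((pages.length : Int) + 1) = ((pages.length + 1 : Nat) : Int) := by push_cast; ring
  rw [h, PySem.List.pyRange_zero_natCast, List.map_map]
  unfold pvRow
  apply List.map_congr_left
  intro j _
  simp only [Function.comp_def, Nat.cast_eq_zero]
  by_cases hj : j = 0
  · subst hj; rw [pvBest]; simp
  · rw [pvBest]; simp [hj]

theorem pvNewRow_row (pages : List Int) (t : Nat) :
    pvNewRow pages (pages.length : Int) (pvRow pages t) = pvRow pages (t + 1) := by
  unfold pvNewRow
  have h : ((pages.length : Int) + 1) = ((pages.length + 1 : Nat) : Int) := by push_cast; ring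
  rw [h, PySem.List.pyRange_zero_natCast, List.map_map]
  conv_rhs => unfold pvRow
  apply List.map_congr_left
  intro j hj
  have hjn : j ≤ pages.length := by
    have := List.mem_range.mp hj; omega
  simp only [Function.comp_def, Nat.cast_eq_zero]
  by_cases hj0 : j = 0
  · subst hj0; rw [pvBest]; simp
  · rw [if_neg hj0, pvInner_eq pages _ j hjn,
      show ((t + 1 : Nat) : Int) = (t : Int) + 1 by push_cast; ring,
      pvBest_succ pages j (by omega) hjn t]

theorem pvFold_rows (pages : List Int) (l : List Int) (t : Nat) :
    l.foldl (fun prev _i => pvNewRow pages (pages.length : Int) prev) (pvRow pages t)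
      = pvRow pages (t + l.length) := by
  induction l generalizing t with
  | nil => simp
  | cons x l ih =>
    simp only [List.foldl_cons, pvNewRow_row, ih, List.length_cons]
    congr 1
    omega

-- ===== VERDICT (by name: the statement is the Claim_ definition above) =====
theorem copy_books_spec : Claim_equal_copy_books := by
  intro pages k _hdom hpre
  unfold Spec_copy_books
  rcases hpre with hk | ⟨hk, hp⟩
  · simp only [copy_books, copy_books_alt]
    rw [pvRow_zero, pvFold_rows]
    simp only [PySem.List.length_pyRange_one]
    rw [show 0 + ((k + 1 - 1).toNat) = k.toNat by omega]
    rw [pvRow_getD pages k.toNat pages.length le_rfl]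
    rw [Int.toNat_of_nonneg (by omega)]
  · subst hk hp
    simp only [copy_books, copy_books_alt]
    rw [show PySem.List.pyRange 1 ((0:Int) + 1) 1 = [] from PySem.List.pyRange_one_eq_nil (by norm_num)]
    simp only [List.foldl_nil]
    rw [pvRow_zero]
    have h := pvRow_getD [] 0 0 le_rfl
    simp only [List.length_nil, Nat.cast_zero] at h ⊢
    rw [h]
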